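-- pv_equiv track=rewrite | github.com/victorhugocf/python | pratica_função_recursiva/exercicio5.py | quicksort_com_contagem
-- ===== SOURCE A (Python) =====
-- def quicksort_com_contagem(lista):
--     contagem = {'chamadas' : 0}
--
--     def quicksort_rec(sublista):
--         contagem['chamadas'] += 1
--
--         if len(sublista) <= 1:
--             return sublista
--
--         pivô = sublista[-1]
--         menores = [x for x in sublista[:-1] if x <= pivô]
--         maiores = [x for x in sublista[:-1] if x > pivô]
--
--         return quicksort_rec(menores) + [pivô] + quicksort_rec(maiores)
--
--     lista_ordenada = quicksort_rec(lista)
--     return lista_ordenada, contagem['chamadas']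
-- ===== SOURCE B (Python) =====
-- def quicksort_com_contagem(lista):
--     out = []
--     contagem = 0
--     stack = [("task", lista)]
--     while stack:
--         kind, val = stack.pop()
--         if kind == "emit":
--             out.append(val)
--         else:
--             contagem += 1
--             if len(val) <= 1:
--                 out.extend(val)
--             else:
--                 pivot = val[-1]
--                 menores = [x for x in val[:-1] if x <= pivot]
--                 maiores = [x for x in val[:-1] if x > pivot]
--                 stack.append(("task", maiores))
--                 stack.append(("emit", pivot))
--                 stack.append(("task", menores))
--     return out, contagem
-- ===== Notes on version B (the rewrite author's own statement) =====
-- stated objective: alternative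
-- what changed: Replaces the nested recursive quicksort with an explicit LIFO stack of sort-tasks and pivot-emit markers driving one iterative loop that builds the output front-to-back and counts one per popped task.
import Mathlib
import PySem

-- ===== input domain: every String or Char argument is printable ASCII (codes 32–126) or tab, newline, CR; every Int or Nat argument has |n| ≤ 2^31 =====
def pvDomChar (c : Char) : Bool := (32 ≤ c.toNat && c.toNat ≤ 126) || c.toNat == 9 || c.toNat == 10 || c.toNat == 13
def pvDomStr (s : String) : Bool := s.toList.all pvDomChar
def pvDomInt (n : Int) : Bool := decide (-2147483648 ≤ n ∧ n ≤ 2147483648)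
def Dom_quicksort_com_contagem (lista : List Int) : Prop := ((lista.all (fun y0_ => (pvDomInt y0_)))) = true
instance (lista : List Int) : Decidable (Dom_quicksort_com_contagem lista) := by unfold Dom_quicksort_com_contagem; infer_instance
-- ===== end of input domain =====

-- B replaces the nested recursion with an explicit LIFO stack of sort-tasks and
-- pivot-emit markers driving one iterative loop (objective: alternative decomposition).

-- ===== PORT A =====
-- quicksort_rec, counting threaded through the returned pair (the Python uses a
-- closed-over mutable counter; the total count 1 + c_menores + c_maiores is the same).
def pvQsRec (sublista : List Int) : List Int × Int :=
  if h : sublista.length ≤ 1 then (sublista, 1)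
  else
    let pivo := (PySem.List.pyGet? sublista (-1)).getD 0  -- len ≥ 2, so pyGet? is some
    let menores := sublista.dropLast.filter (fun x => decide (x ≤ pivo))
    let maiores := sublista.dropLast.filter (fun x => decide (pivo < x))
    ((pvQsRec menores).1 ++ [pivo] ++ (pvQsRec maiores).1,
     1 + (pvQsRec menores).2 + (pvQsRec maiores).2)
termination_by sublista.length
decreasing_by
  · have := List.length_filter_le
      (fun x => decide (x ≤ (PySem.List.pyGet? sublista (-1)).getD 0)) sublista.dropLast
    have := sublista.length_dropLast
    omega
  · have := List.length_filter_le
      (fun x => decide ((PySem.List.pyGet? sublista (-1)).getD 0 < x)) sublista.dropLast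
    have := sublista.length_dropLast
    omega

def quicksort_com_contagem (lista : List Int) : List Int × Int :=
  pvQsRec lista

-- ===== PORT B =====
-- stack items: a sublist still to sort, or a pivot waiting to be emitted
inductive PvItem where
  | task : List Int → PvItem
  | emit : Int → PvItem
deriving DecidableEq, Repr

def pvItemW : PvItem → Nat
  | .task l => 3 * l.length + 1
  | .emit _ => 1

def pvStackW (s : List PvItem) : Nat := (s.map pvItemW).sum

-- the lengths of the two complementary partitions sum to the partitioned length
theorem pvFilterSplit (p : Int) : ∀ (l : List Int),
    (l.filter (fun x => decide (x ≤ p))).length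
      + (l.filter (fun x => decide (p < x))).length = l.length := by
  intro l
  induction l with
  | nil => simp
  | cons a t ih =>
    by_cases h : a ≤ p
    · simp [h, not_lt.mpr h]; omega
    · simp [h, not_le.mp h]; omega

-- the while loop: pop the top item, handle it, loop
def pvLoop : List PvItem → List Int → Int → List Int × Int
  | [], out, contagem => (out, contagem)
  | .emit v :: stack, out, contagem => pvLoop stack (out ++ [v]) contagem
  | .task val :: stack, out, contagem =>
    if h : val.length ≤ 1 then pvLoop stack (out ++ val) (contagem + 1)
    else
      let pivot := (PySem.List.pyGet? val (-1)).getD 0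
      let menores := val.dropLast.filter (fun x => decide (x ≤ pivot))
      let maiores := val.dropLast.filter (fun x => decide (pivot < x))
      pvLoop (.task menores :: .emit pivot :: .task maiores :: stack) out (contagem + 1)
termination_by s => pvStackW s
decreasing_by
  · simp [pvStackW, pvItemW]
  · simp [pvStackW, pvItemW]
  · have hs := pvFilterSplit ((PySem.List.pyGet? val (-1)).getD 0) val.dropLast
    have := val.length_dropLast
    simp [pvStackW, pvItemW]
    omega

def quicksort_com_contagem_alt (lista : List Int) : List Int × Int :=
  pvLoop [.task lista] [] 0

-- ===== PRECONDITION & SPEC =====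
def Spec_quicksort_com_contagem (lista : List Int) (out : List Int × Int) : Prop := out = quicksort_com_contagem_alt lista
instance (lista : List Int) (out : List Int × Int) : Decidable (Spec_quicksort_com_contagem lista out) := by unfold Spec_quicksort_com_contagem; infer_instance

-- ===== CLAIM (what is proved, stated in full; the proofs are below) =====
def Claim_equal_quicksort_com_contagem : Prop := ∀ (lista : List Int), Dom_quicksort_com_contagem lista → Spec_quicksort_com_contagem lista (quicksort_com_contagem lista)

-- ===== LEMMAS AND PROOFS =====

-- running the loop on a sort-task appends A's sorted result and adds A's call count
theorem pvLoop_task (n : Nat) :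
    ∀ (l : List Int), l.length ≤ n → ∀ (stack : List PvItem) (out : List Int) (c : Int),
      pvLoop (.task l :: stack) out c
        = pvLoop stack (out ++ (pvQsRec l).1) (c + (pvQsRec l).2) := by
  induction n with
  | zero =>
    intro l hl stack out c
    have h1 : l.length ≤ 1 := by omega
    rw [pvLoop, pvQsRec]
    simp [h1]
  | succ n ih =>
    intro l hl stack out c
    by_cases h1 : l.length ≤ 1
    · rw [pvLoop, pvQsRec]; simp [h1]
    · rw [pvLoop, pvQsRec]
      simp only [h1, dite_false]
      set pivot := (PySem.List.pyGet? l (-1)).getD 0 with hp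
      set menores := l.dropLast.filter (fun x => decide (x ≤ pivot)) with hm
      set maiores := l.dropLast.filter (fun x => decide (pivot < x)) with hM
      have hd : l.dropLast.length = l.length - 1 := l.length_dropLast
      have hml : menores.length ≤ n := by
        have := List.length_filter_le (fun x => decide (x ≤ pivot)) l.dropLast
        rw [← hm] at this; omega
      have hMl : maiores.length ≤ n := by
        have := List.length_filter_le (fun x => decide (pivot < x)) l.dropLast
        rw [← hM] at this; omega
      rw [ih menores hml, pvLoop, ih maiores hMl]
      have harith : c + 1 + (pvQsRec menores).2 + (pvQsRec maiores).2
          = c + (1 + (pvQsRec menores).2 + (pvQsRec maiores).2) := by ring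
      rw [harith]
      simp [List.append_assoc]

theorem quicksort_com_contagem_spec' (lista : List Int) :
    quicksort_com_contagem lista = quicksort_com_contagem_alt lista := by
  unfold quicksort_com_contagem quicksort_com_contagem_alt
  rw [pvLoop_task lista.length lista (le_refl _), pvLoop]
  simp

-- ===== VERDICT (by name: the statement is the Claim_ definition above) =====
theorem quicksort_com_contagem_spec : Claim_equal_quicksort_com_contagem := by
  intro lista _
  exact quicksort_com_contagem_spec' lista
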